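-- pv_equiv track=rewrite | github.com/JaviOHS/calc-matrix | utils/formating/input_formating.py | normalize_spaces
-- ===== SOURCE A (Python) =====
-- def normalize_spaces(text: str) -> str:
--     """Normaliza los espacios en el texto"""
--     normalized = []
--     skip_space = False
--
--     for char in text:
--         if char == ' ':
--             if not skip_space:
--                 normalized.append(' ')
--                 skip_space = True
--         else:
--             normalized.append(char)
--             skip_space = False
--
--     return ''.join(normalized)
-- ===== SOURCE B (Python) =====
-- def normalize_spaces(text: str) -> str:
--     """Normaliza los espacios en el texto"""
--     return text[:1] + ''.join(c for p, c in zip(text, text[1:]) if c != ' ' or p != ' ')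
-- ===== Notes on version B (the rewrite author's own statement) =====
-- stated objective: simpler
-- what changed: Replaces the stateful character scan with a skip_space flag by a stateless one-line pairwise filter: keep the first character, then keep each character unless both it and its predecessor are spaces (zip of the text with itself shifted by one).
import Mathlib
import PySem

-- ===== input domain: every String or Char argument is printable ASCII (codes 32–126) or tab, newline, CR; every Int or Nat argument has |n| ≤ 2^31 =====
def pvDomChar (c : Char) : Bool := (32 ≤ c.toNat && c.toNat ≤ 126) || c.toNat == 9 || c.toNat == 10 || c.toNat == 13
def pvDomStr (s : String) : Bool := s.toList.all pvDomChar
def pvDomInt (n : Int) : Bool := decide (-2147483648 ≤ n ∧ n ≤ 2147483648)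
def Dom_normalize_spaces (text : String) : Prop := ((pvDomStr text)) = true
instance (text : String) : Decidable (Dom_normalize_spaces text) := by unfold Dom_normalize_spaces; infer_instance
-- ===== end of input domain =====

-- ===== PORT A =====
-- One honest line: B is a shorter, stateless pairwise filter (keep a char unless it and its
-- predecessor are both spaces) instead of A's scan with a skip_space flag; same O(n) cost.
def normalize_spaces (text : String) : String :=
  let res := text.toList.foldl
    (fun (st : List Char × Bool) char =>
      if char = ' ' then
        if !st.2 then (st.1 ++ [' '], true) else st
      else (st.1 ++ [char], false))
    ([], false)
  String.mk res.1

-- ===== PORT B =====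
def normalize_spaces_alt (text : String) : String :=
  let l := text.toList
  String.mk (l.take 1 ++ ((l.zip (l.drop 1)).filter
    (fun pc => pc.2 != ' ' || pc.1 != ' ')).map Prod.snd)

-- ===== PRECONDITION & SPEC =====
def Spec_normalize_spaces (text : String) (out : String) : Prop := out = normalize_spaces_alt text
instance (text : String) (out : String) : Decidable (Spec_normalize_spaces text out) := by unfold Spec_normalize_spaces; infer_instance

-- ===== CLAIM (what is proved, stated in full; the proofs are below) =====
def Claim_equal_normalize_spaces : Prop := ∀ (text : String), Dom_normalize_spaces text → Spec_normalize_spaces text (normalize_spaces text)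

-- ===== LEMMAS AND PROOFS =====

-- reference: collapse with known previous character p
def pvG (p : Char) : List Char → List Char
  | [] => []
  | c :: cs => if c = ' ' ∧ p = ' ' then pvG c cs else c :: pvG c cs

theorem pvFoldA_eq_g (l : List Char) : ∀ (acc : List Char) (p : Char),
    (l.foldl
      (fun (st : List Char × Bool) char =>
        if char = ' ' then
          if !st.2 then (st.1 ++ [' '], true) else st
        else (st.1 ++ [char], false))
      (acc, decide (p = ' '))).1 = acc ++ pvG p l := by
  induction l with
  | nil => intro acc p; simp [pvG]
  | cons c cs ih =>
    intro acc p
    by_cases hc : c = ' '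
    · by_cases hp : p = ' '
      · simp [List.foldl, pvG, hc, hp]
        have := ih acc c
        simp [hc] at this
        simpa [hc, hp] using this
      · simp [List.foldl, pvG, hc, hp]
        have := ih (acc ++ [' ']) c
        simp [hc] at this
        simpa [hc, hp] using this
    · simp [List.foldl, pvG, hc]
      have := ih (acc ++ [c]) c
      simp [hc] at this
      simpa [hc] using this

theorem pvZip_eq_g (c : Char) (cs : List Char) :
    (((c :: cs).zip cs).filter (fun pc => pc.2 != ' ' || pc.1 != ' ')).map Prod.snd
      = pvG c cs := by
  induction cs generalizing c with
  | nil => simp [pvG]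
  | cons d ds ih =>
    have hz : ((c :: d :: ds).zip (d :: ds)) = (c, d) :: ((d :: ds).zip ds) := rfl
    rw [hz, List.filter_cons]
    by_cases h : d = ' ' ∧ c = ' '
    · simp [h.1, h.2, pvG, ih]
    · have hp : ((d != ' ' || c != ' ')) = true := by
        rcases not_and_or.mp h with h1 | h1 <;> simp [h1]
      simp [hp, pvG, h, ih]

-- ===== VERDICT (by name: the statement is the Claim_ definition above) =====
theorem normalize_spaces_spec : Claim_equal_normalize_spaces := by
  intro text _
  unfold Spec_normalize_spaces normalize_spaces normalize_spaces_alt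
  cases h : text.toList with
  | nil => simp [h]
  | cons c cs =>
    have hA := pvFoldA_eq_g (c :: cs) [] 'A'
    simp only [decide_eq_true_eq] at hA
    have hA' : ((c :: cs).foldl
        (fun (st : List Char × Bool) char =>
          if char = ' ' then
            if !st.2 then (st.1 ++ [' '], true) else st
          else (st.1 ++ [char], false))
        ([], false)).1 = pvG 'A' (c :: cs) := by
      simpa using hA
    have hG : pvG 'A' (c :: cs) = c :: pvG c cs := by
      simp [pvG]
    simp only [h, List.drop_one, List.tail, List.take, hA', hG, pvZip_eq_g]
    rfl
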